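-- pv_equiv track=rewrite | github.com/unabl4/codefights | lucky_kids/lucky_kids.py | luckyKids
-- ===== SOURCE A (Python) =====
-- from bisect import insort as I
--
-- def luckyKids(b):
--     # not entirely sure what is so 'hard' about this challenge
--     # behaving better than at least half means having a behaviour STRICTLY GREATER than the MEDIAN
--     # MEDIAN = the middle value of a SORTED (asc) array;
--     # so to solve this we can run a running median
--
--     c = 1 # at least one child (the eldest) will get a gift
--     n = len(b)
--     v = [] # median array storage
--     l = 0 # median array storage length
--     for i in range(n-1):
--         j = n-2-i
--         I(v,b[j+1]) # add the element
--         l += 1 # median storage length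
--
--         if l % 2 == 0:
--             c += v[(l//2)-1] < b[j] <= v[l//2] or v[l//2] < b[j]
--         else:
--             c += v[l//2] < b[j]
--
--     return c
-- ===== SOURCE B (Python) =====
-- def luckyKids(b):
--     # Simpler: the eldest child always gets a gift; every other child j gets one
--     # iff its value strictly exceeds the lower median of the sorted suffix of
--     # younger children, which is element (l-1)//2 of that sorted suffix.
--     n = len(b)
--     c = 1
--     for j in range(n - 1):
--         s = sorted(b[j + 1:])
--         if b[j] > s[(len(s) - 1) // 2]:
--             c += 1
--     return c
-- ===== Notes on version B (the rewrite author's own statement) =====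
-- stated objective: simpler
-- what changed: Replaces A's running-median machinery (reverse-indexed loop maintaining a bisect.insort accumulator and an even/odd parity split comparing against the two middle slots) with a direct forward loop that sorts each suffix afresh and compares b[j] with the single lower-median slot at index (l-1)//2.
import Mathlib
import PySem

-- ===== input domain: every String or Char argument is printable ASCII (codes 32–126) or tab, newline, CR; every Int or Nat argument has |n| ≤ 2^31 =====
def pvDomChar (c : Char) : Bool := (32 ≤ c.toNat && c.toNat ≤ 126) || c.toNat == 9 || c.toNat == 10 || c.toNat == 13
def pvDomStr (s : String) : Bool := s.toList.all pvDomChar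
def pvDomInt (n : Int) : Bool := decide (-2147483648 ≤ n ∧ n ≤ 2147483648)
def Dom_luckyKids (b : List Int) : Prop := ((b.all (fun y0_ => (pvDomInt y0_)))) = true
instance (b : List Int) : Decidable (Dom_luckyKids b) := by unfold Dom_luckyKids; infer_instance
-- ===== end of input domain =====

-- B replaces A's running-median accumulator (bisect.insort plus a parity-split comparison
-- against the two middle slots) by a direct forward loop that sorts each suffix and compares
-- with the single lower-median slot (l-1)//2: simpler, same results on every input.

-- ===== PORT A =====
-- A's loop body; the state is (c, v, l), i is the variable of `for i in range(n-1)`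
def luckyKidsStep (n : Int) (b : List Int) (st : Int × List Int × Int) (i : Int) : Int × List Int × Int :=
  let c := st.1
  let v := st.2.1
  let l := st.2.2
  let j := n - 2 - i
  let x := PySem.List.pyGetD b (j + 1) 0          -- b[j+1]; the index is always in range inside the loop
  let v' := PySem.List.insert v ((PySem.List.bisectRight v x : Nat) : Int) x   -- bisect.insort(v, x)
  let l' := l + 1
  let bj := PySem.List.pyGetD b j 0               -- b[j]; the index is always in range inside the loop
  if PySem.Int.mod l' 2 = 0 then
    (c + (if (PySem.List.pyGetD v' (PySem.Int.floordiv l' 2 - 1) 0 < bj ∧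
              bj ≤ PySem.List.pyGetD v' (PySem.Int.floordiv l' 2) 0) ∨
             PySem.List.pyGetD v' (PySem.Int.floordiv l' 2) 0 < bj then 1 else 0), v', l')
  else
    (c + (if PySem.List.pyGetD v' (PySem.Int.floordiv l' 2) 0 < bj then 1 else 0), v', l')

def luckyKids (b : List Int) : Int :=
  let n : Int := b.length
  ((PySem.List.pyRange 0 (n - 1) 1).foldl (luckyKidsStep n b) (1, ([] : List Int), 0)).1

-- ===== PORT B =====
-- B's loop body: sort the suffix b[j+1:], compare b[j] with its lower-median slot
def luckyKidsAltStep (b : List Int) (c : Int) (j : Int) : Int :=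
  let s := PySem.List.sorted (PySem.List.slice b (some (j + 1)) none) (fun x => x) false
  if PySem.List.pyGetD s (PySem.Int.floordiv ((s.length : Int) - 1) 2) 0 < PySem.List.pyGetD b j 0 then
    c + 1
  else
    c

def luckyKids_alt (b : List Int) : Int :=
  let n : Int := b.length
  (PySem.List.pyRange 0 (n - 1) 1).foldl (luckyKidsAltStep b) 1

-- ===== PRECONDITION & SPEC =====
def Spec_luckyKids (b : List Int) (out : Int) : Prop := out = luckyKids_alt b
instance (b : List Int) (out : Int) : Decidable (Spec_luckyKids b out) := by unfold Spec_luckyKids; infer_instance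

-- ===== CLAIM (what is proved, stated in full; the proofs are below) =====
def Claim_equal_luckyKids : Prop := ∀ (b : List Int), Dom_luckyKids b → Spec_luckyKids b (luckyKids b)

-- ===== LEMMAS AND PROOFS =====

-- sorted-ascending copy of a list (Python sorted with the identity key)
def pvS (xs : List Int) : List Int := PySem.List.sorted xs (fun x => x) false

-- lower-median slot of a sorted list
def pvMed (s : List Int) : Int := s.getD ((s.length - 1) / 2) 0

-- the 0/1 indicator both programs add for child j (0 ≤ j ≤ n-2)
def pvInd (b : List Int) (j : Nat) : Int :=
  if pvMed (pvS (b.drop (j + 1))) < b.getD j 0 then 1 else 0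

theorem pvS_pairwise (xs : List Int) : (pvS xs).Pairwise (· ≤ ·) := by
  simpa using PySem.List.sorted_pairwise xs (fun x => x)

theorem pvS_perm (xs : List Int) : (pvS xs).Perm xs := PySem.List.sorted_perm xs _ _

theorem pvS_length (xs : List Int) : (pvS xs).length = xs.length :=
  (pvS_perm xs).length_eq

-- bisect.insort into the sorted copy of ys yields the sorted copy of x :: ys
theorem pv_insort (x : Int) (ys : List Int) :
    PySem.List.insert (pvS ys) ((PySem.List.bisectRight (pvS ys) x : Nat) : Int) x
      = pvS (x :: ys) := by
  have hp : (pvS ys).Pairwise (· ≤ ·) := pvS_pairwise ys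
  obtain ⟨hle, hbefore, hafter⟩ := PySem.List.bisectRight_spec (pvS ys) x hp
  rw [PySem.List.insert_natCast _ _ _ hle]
  have hdropmem : ∀ y ∈ (pvS ys).drop (PySem.List.bisectRight (pvS ys) x), x < y := by
    intro y hy
    obtain ⟨k, hk, hEq⟩ := List.mem_iff_getElem.mp hy
    rw [← hEq, List.getElem_drop]
    have hk' : PySem.List.bisectRight (pvS ys) x + k < (pvS ys).length := by
      have := hk; simp [List.length_drop] at this; omega
    exact hafter _ hk' (by omega)
  have htakemem : ∀ a ∈ (pvS ys).take (PySem.List.bisectRight (pvS ys) x), a ≤ x := by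
    intro a ha
    obtain ⟨i, hi, hEq⟩ := List.mem_iff_getElem.mp ha
    have hilen : i < (pvS ys).length := by
      have := hi; simp [List.length_take] at this; omega
    have hip : i < PySem.List.bisectRight (pvS ys) x := by
      have := hi; simp [List.length_take] at this; omega
    rw [← hEq, List.getElem_take]
    exact hbefore i hilen hip
  refine (PySem.List.sorted_id_eq_of_perm_of_pairwise (x :: ys) _ ?_ ?_).symm
  · exact List.perm_middle.trans
      (List.Perm.cons x (by rw [List.take_append_drop]; exact pvS_perm ys))
  · rw [List.pairwise_append]
    refine ⟨hp.sublist (List.take_sublist _ _), ?_, ?_⟩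
    · refine List.pairwise_cons.mpr ⟨?_, hp.sublist (List.drop_sublist _ _)⟩
      intro y hy; exact le_of_lt (hdropmem y hy)
    · intro a ha b hb
      have hax : a ≤ x := htakemem a ha
      rcases List.mem_cons.mp hb with hbx | hbd
      · exact hbx ▸ hax
      · exact le_of_lt (lt_of_le_of_lt hax (hdropmem b hbd))

-- A's loop body on the invariant state
theorem pvA_step (b : List Int) (t : Nat) (c : Int) (ht : t + 2 ≤ b.length) :
    luckyKidsStep (b.length : Int) b (c, pvS (b.drop (b.length - t)), (t : Int)) ((t : Nat) : Int)
      = (c + pvInd b (b.length - 2 - t), pvS (b.drop (b.length - (t + 1))), ((t + 1 : Nat) : Int)) := by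
  have hlt : b.length - (t + 1) < b.length := by omega
  have hx : ((b.length : Int) - 2 - (t : Int) + 1) = ((b.length - (t + 1) : Nat) : Int) := by omega
  have hj : ((b.length : Int) - 2 - (t : Int)) = ((b.length - 2 - t : Nat) : Int) := by omega
  have hl : ((t : Int) + 1) = ((t + 1 : Nat) : Int) := by omega
  have hcons : b.getD (b.length - (t + 1)) 0 :: b.drop (b.length - t) = b.drop (b.length - (t + 1)) := by
    rw [List.getD_eq_getElem b 0 hlt, List.drop_eq_getElem_cons hlt]
    congr 2
    omega
  have hvlen : (pvS (b.drop (b.length - (t + 1)))).length = t + 1 := by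
    rw [pvS_length, List.length_drop]; omega
  have hidx2 : b.length - 2 - t + 1 = b.length - (t + 1) := by omega
  have hmod : PySem.Int.mod ((t + 1 : Nat) : Int) 2 = (((t + 1) % 2 : Nat) : Int) := by
    exact_mod_cast PySem.Int.mod_natCast (t + 1) 2
  have hfd : PySem.Int.floordiv ((t + 1 : Nat) : Int) 2 = (((t + 1) / 2 : Nat) : Int) := by
    exact_mod_cast PySem.Int.floordiv_natCast (t + 1) 2
  simp only [luckyKidsStep]
  rw [hx]
  rw [PySem.List.pyGetD_natCast b (b.length - (t + 1)) 0]
  rw [pv_insort, hcons, hl, hmod, hfd, hj]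
  rw [PySem.List.pyGetD_natCast b (b.length - 2 - t) 0]
  simp only [pvInd, pvMed, hidx2, hvlen]
  set s := pvS (b.drop (b.length - (t + 1))) with hs
  have hpair : s.Pairwise (· ≤ ·) := pvS_pairwise _
  have hb2 : (t + 1) / 2 < s.length := by rw [hvlen]; omega
  by_cases hev : (t + 1) % 2 = 0
  · rw [if_pos (show (((t + 1) % 2 : Nat) : Int) = 0 by omega)]
    have hfe : (((t + 1) / 2 : Nat) : Int) - 1 = (((t + 1) / 2 - 1 : Nat) : Int) := by omega
    rw [hfe]
    simp only [PySem.List.pyGetD_natCast]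
    have hb1 : (t + 1) / 2 - 1 < s.length := by rw [hvlen]; omega
    have hmed0 : (t + 1 - 1) / 2 = (t + 1) / 2 - 1 := by omega
    rw [hmed0]
    have hmono : s.getD ((t + 1) / 2 - 1) 0 ≤ s.getD ((t + 1) / 2) 0 := by
      rw [List.getD_eq_getElem s 0 hb1, List.getD_eq_getElem s 0 hb2]
      exact List.pairwise_iff_getElem.mp hpair _ _ hb1 hb2 (by omega)
    simp only [Prod.mk.injEq, and_true]
    split_ifs <;> omega
  · rw [if_neg (show ¬ ((((t + 1) % 2 : Nat) : Int) = 0) by omega)]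
    simp only [PySem.List.pyGetD_natCast]
    have hmed1 : (t + 1 - 1) / 2 = (t + 1) / 2 := by omega
    rw [hmed1]

-- A's loop invariant: after t iterations the state is
-- (1 + the indicators of the children already seen, the sorted suffix, t)
theorem pvA_loop (b : List Int) (t : Nat) (ht : t + 1 ≤ b.length) :
    ((List.range t).map (fun (k : Nat) => (k : Int))).foldl (luckyKidsStep (b.length : Int) b)
        (1, ([] : List Int), 0)
      = (1 + ((List.range t).map (fun i => pvInd b (b.length - 2 - i))).sum,
         pvS (b.drop (b.length - t)), (t : Int)) := by
  induction t with
  | zero =>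
      have h0 : pvS ([] : List Int) = ([] : List Int) := by decide
      simp [List.drop_length, h0]
  | succ t ih =>
      simp only [List.range_succ, List.map_append, List.foldl_append, List.map_cons,
        List.map_nil, List.foldl_cons, List.foldl_nil, List.sum_append, List.sum_cons,
        List.sum_nil, add_zero]
      rw [ih (by omega)]
      rw [pvA_step b t _ (by omega)]
      simp only [Prod.mk.injEq, and_true]
      ring

-- B computes 1 + the same indicators, in index order
theorem pvB_sum (b : List Int) (hb : 1 ≤ b.length) :
    luckyKids_alt b = 1 + ((List.range (b.length - 1)).map (pvInd b)).sum := by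
  have h1 : (b.length : Int) - 1 = ((b.length - 1 : Nat) : Int) := by omega
  have hstep : ∀ (c : Int), ∀ k ∈ List.range (b.length - 1),
      luckyKidsAltStep b c ((k : Nat) : Int) = c + pvInd b k := by
    intro c k hk
    have hk' : k < b.length - 1 := List.mem_range.mp hk
    have hc : ((k : Int) + 1) = ((k + 1 : Nat) : Int) := by omega
    simp only [luckyKidsAltStep, hc, PySem.List.slice_from_natCast]
    have hlen : (PySem.List.sorted (b.drop (k + 1)) (fun x => x) false).length
        = b.length - (k + 1) := by
      rw [(PySem.List.sorted_perm _ _ _).length_eq, List.length_drop]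
    have hcast : ((PySem.List.sorted (b.drop (k + 1)) (fun x => x) false).length : Int) - 1
        = (((PySem.List.sorted (b.drop (k + 1)) (fun x => x) false).length - 1 : Nat) : Int) := by
      rw [hlen]; omega
    have hfd2 : PySem.Int.floordiv
          ((((PySem.List.sorted (b.drop (k + 1)) (fun x => x) false).length - 1 : Nat)) : Int) 2
        = ((((PySem.List.sorted (b.drop (k + 1)) (fun x => x) false).length - 1) / 2 : Nat) : Int) := by
      exact_mod_cast PySem.Int.floordiv_natCast
        ((PySem.List.sorted (b.drop (k + 1)) (fun x => x) false).length - 1) 2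
    rw [hcast, hfd2]
    simp only [PySem.List.pyGetD_natCast, pvInd, pvMed, pvS]
    split_ifs <;> omega
  simp only [luckyKids_alt, h1, PySem.List.pyRange_zero_natCast, List.foldl_map]
  rw [PySem.List.foldl_congr_mem (List.range (b.length - 1))
    (fun x y => luckyKidsAltStep b x ((y : Nat) : Int)) (fun c k => c + pvInd b k) 1 hstep]
  exact PySem.List.foldl_add _ _ _

-- reversing the order of the indicators does not change their sum
theorem pv_rev (f : Nat → Int) (m : Nat) :
    (List.range m).map (fun i => f (m - 1 - i)) = ((List.range m).map f).reverse := by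
  induction m with
  | zero => simp
  | succ m ih =>
      conv_lhs => rw [List.range_succ_eq_map]
      conv_rhs => rw [List.range_succ]
      simp only [List.map_cons, List.map_map, List.map_append, List.reverse_append,
        List.reverse_cons, List.reverse_nil, List.nil_append, List.map_nil,
        List.singleton_append]
      have h0 : m + 1 - 1 - 0 = m := by omega
      have hcomp : ((fun i => f (m + 1 - 1 - i)) ∘ Nat.succ) = fun i => f (m - 1 - i) := by
        funext i; simp only [Function.comp_apply]; congr 1; omega
      rw [h0, hcomp, ih]

-- ===== VERDICT (by name: the statement is the Claim_ definition above) =====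
theorem luckyKids_spec : Claim_equal_luckyKids := by
  intro b _
  unfold Spec_luckyKids
  cases b with
  | nil => decide
  | cons x xs =>
      have hb1 : 1 ≤ (x :: xs).length := by simp
      have h1 : (((x :: xs).length : Int) - 1) = (((x :: xs).length - 1 : Nat) : Int) := by omega
      simp only [luckyKids, h1, PySem.List.pyRange_zero_natCast]
      rw [pvA_loop (x :: xs) ((x :: xs).length - 1) (by omega)]
      rw [pvB_sum (x :: xs) hb1]
      have hfun : (fun i => pvInd (x :: xs) ((x :: xs).length - 2 - i))
          = fun i => pvInd (x :: xs) (((x :: xs).length - 1) - 1 - i) := by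
        funext i; congr 1
      simp only [hfun, pv_rev (pvInd (x :: xs)) ((x :: xs).length - 1), List.sum_reverse]
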